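-- pv_equiv track=rewrite | github.com/ilya0401/codewars | solutions/seven_next_letters.py | comes_after
-- ===== SOURCE A (Python) =====
-- def comes_after(st, l):
--     lis_of_ls = list(st)
--     result = []
--     lis_of_ls_filtered = []
--     for i in range(len(lis_of_ls)-1):
--         if lis_of_ls[i].isalpha():
--             lis_of_ls_filtered.append(lis_of_ls[i])
--     for i in range(len(lis_of_ls_filtered)-1):
--         if lis_of_ls_filtered[i] == l.lower() or lis_of_ls_filtered[i] == l.upper():
--             if i != len(lis_of_ls_filtered)-1:
--                 result.append(lis_of_ls_filtered[i+1])
--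
--
--     str_result = ''.join(result)
--     return str_result
-- ===== SOURCE B (Python) =====
-- def comes_after(st, l):
--     lo, up = l.lower(), l.upper()
--     prev = None
--     out = []
--     for c in st[:-1]:
--         if c.isalpha():
--             if prev is not None and (prev == lo or prev == up):
--                 out.append(c)
--             prev = c
--     return ''.join(out)
-- ===== Notes on version B (the rewrite author's own statement) =====
-- stated objective: faster
-- what changed: Replaced A's two-pass design (build a filtered list of alpha chars from st[:-1], then a second indexed loop pairing filtered[i] with filtered[i+1], recomputing l.lower()/l.upper() on every iteration) by a single streaming pass over st[:-1] that computes l.lower()/l.upper() once, remembers only the previous alpha character and appends the current alpha char when the remembered one matches.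
import Mathlib
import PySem

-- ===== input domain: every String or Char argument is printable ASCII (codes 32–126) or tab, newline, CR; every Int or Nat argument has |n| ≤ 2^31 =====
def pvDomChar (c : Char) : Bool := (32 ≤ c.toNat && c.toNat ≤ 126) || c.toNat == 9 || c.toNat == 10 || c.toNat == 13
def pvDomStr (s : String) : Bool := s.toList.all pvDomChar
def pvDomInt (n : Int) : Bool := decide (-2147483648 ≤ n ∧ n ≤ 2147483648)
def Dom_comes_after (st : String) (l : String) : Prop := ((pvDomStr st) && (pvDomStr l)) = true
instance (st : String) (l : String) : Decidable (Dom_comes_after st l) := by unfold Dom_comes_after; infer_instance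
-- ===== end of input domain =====

-- B replaces A's filter-list-then-index-pairs two-pass by one streaming pass over st[:-1] that keeps the previous alpha char (objective: faster — one pass, l.lower()/l.upper() computed once instead of per iteration).

-- ===== PORT A =====
def comes_after (st : String) (l : String) : String :=
  let lis := st.toList
  let filtered :=
    (PySem.List.pyRange 0 ((lis.length : Int) - 1) 1).foldl
      (fun acc i =>
        if PySem.Chars.isalpha (PySem.List.pyGetD lis i ' ') then
          acc ++ [PySem.List.pyGetD lis i ' ']
        else acc) []
  let result :=
    (PySem.List.pyRange 0 ((filtered.length : Int) - 1) 1).foldl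
      (fun acc i =>
        if ([PySem.List.pyGetD filtered i ' '] == PySem.Chars.lower l.toList
            || [PySem.List.pyGetD filtered i ' '] == PySem.Chars.upper l.toList) then
          if i ≠ (filtered.length : Int) - 1 then
            acc ++ [PySem.List.pyGetD filtered (i + 1) ' ']
          else acc
        else acc) []
  String.ofList result

-- ===== PORT B =====
def comes_after_alt (st : String) (l : String) : String :=
  let lo := PySem.Chars.lower l.toList
  let up := PySem.Chars.upper l.toList
  let fin :=
    (PySem.List.slice st.toList none (some (-1))).foldl
      (fun s c =>
        if PySem.Chars.isalpha c then
          (some c,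
            match s.1 with
            | some p => if ([p] == lo || [p] == up) then s.2 ++ [c] else s.2
            | none => s.2)
        else s)
      ((none : Option Char), ([] : List Char))
  String.ofList fin.2

-- ===== PRECONDITION & SPEC =====
def Spec_comes_after (st : String) (l : String) (out : String) : Prop := out = comes_after_alt st l
instance (st : String) (l : String) (out : String) : Decidable (Spec_comes_after st l out) := by unfold Spec_comes_after; infer_instance

-- ===== CLAIM (what is proved, stated in full; the proofs are below) =====
def Claim_equal_comes_after : Prop := ∀ (st : String) (l : String), Dom_comes_after st l → Spec_comes_after st l (comes_after st l)

-- ===== LEMMAS AND PROOFS =====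

-- proof-only: the char after each q-matching char, paired against previous char p
def pvH (q : Char → Bool) : Char → List Char → List Char
  | _, [] => []
  | p, c :: cs => (if q p then [c] else []) ++ pvH q c cs

def pvG (q : Char → Bool) : List Char → List Char
  | [] => []
  | a :: rest => pvH q a rest

-- a Nat index loop reading xs.getD is a fold over the prefix
theorem pv_foldl_range_getD {α β : Type} (xs : List α) (d : α) (g : β → α → β) :
    ∀ (n : Nat), n ≤ xs.length → ∀ (init : β),
      (List.range n).foldl (fun acc k => g acc (xs.getD k d)) init = (xs.take n).foldl g init := by
  intro n
  induction n with
  | zero => intro _ init; simp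
  | succ m ih =>
    intro hn init
    have hm : m < xs.length := by omega
    rw [List.range_succ, List.foldl_append, ih (by omega)]
    rw [show xs.take (m+1) = xs.take m ++ [xs.getD m d] by
      rw [List.take_add_one]; simp [List.getD, List.getElem?_eq_getElem hm]]
    simp

-- A's first loop is filter isalpha over st[:-1]
theorem pv_loopA1 (xs : List α) [Inhabited α] (d : α) (p : α → Bool) :
    (PySem.List.pyRange 0 ((xs.length : Int) - 1) 1).foldl
      (fun acc i => if p (PySem.List.pyGetD xs i d) then acc ++ [PySem.List.pyGetD xs i d] else acc) []
    = xs.dropLast.filter p := by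
  rw [PySem.List.pyRange_one, List.foldl_map]
  have h1 : (((xs.length : Int) - 1) - 0).toNat = xs.length - 1 := by omega
  rw [h1]
  have h2 : (List.range (xs.length - 1)).foldl
      (fun acc (k : Nat) => if p (PySem.List.pyGetD xs ((0:Int) + ↑k) d) then acc ++ [PySem.List.pyGetD xs ((0:Int) + ↑k) d] else acc) []
      = (List.range (xs.length - 1)).foldl
      (fun acc k => if p (xs.getD k d) then acc ++ [xs.getD k d] else acc) [] := by
    apply PySem.List.foldl_congr_mem
    intro acc k _
    simp [PySem.List.pyGetD_natCast]
  rw [h2, pv_foldl_range_getD xs d (fun acc v => if p v then acc ++ [v] else acc) (xs.length - 1) (by omega),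
      ← List.dropLast_eq_take, PySem.List.foldl_append_if_eq_filter]
  simp

-- pair loop: for k in range(len-1): if q(ys[k]): out.append(ys[k+1])
theorem pv_loopPairs (q : Char → Bool) :
    ∀ (ys : List Char) (acc : List Char),
      (List.range (ys.length - 1)).foldl
        (fun acc k => if q (ys.getD k ' ') then acc ++ [ys.getD (k+1) ' '] else acc) acc
      = acc ++ pvG q ys := by
  intro ys
  induction ys with
  | nil => intro acc; simp [pvG]
  | cons a t ih =>
    intro acc
    cases t with
    | nil => simp [pvG, pvH]
    | cons b rest =>
      have hlen : (a :: b :: rest).length - 1 = rest.length + 1 := by simp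
      rw [hlen, List.range_succ_eq_map]
      rw [List.foldl_cons, List.foldl_map]
      have hstep : (List.range rest.length).foldl
          (fun acc k => if q ((a :: b :: rest).getD (Nat.succ k) ' ') then acc ++ [(a :: b :: rest).getD (Nat.succ k + 1) ' '] else acc)
          (if q ((a :: b :: rest).getD 0 ' ') then acc ++ [(a :: b :: rest).getD 1 ' '] else acc)
          = (List.range ((b :: rest).length - 1)).foldl
          (fun acc k => if q ((b :: rest).getD k ' ') then acc ++ [(b :: rest).getD (k+1) ' '] else acc)
          (if q a then acc ++ [b] else acc) := by
        have hr : rest.length = (b :: rest).length - 1 := by simp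
        rw [hr]
        apply PySem.List.foldl_congr_mem
        intro acc k _
        simp
      rw [hstep, ih]
      simp only [pvG, pvH]
      by_cases hq : q a <;> simp [hq]

-- A's second loop, in its pyRange surface form, is pvG
theorem pv_loopA2 (q : Char → Bool) (ys : List Char) :
    (PySem.List.pyRange 0 ((ys.length : Int) - 1) 1).foldl
      (fun acc i =>
        if q (PySem.List.pyGetD ys i ' ') then
          if i ≠ (ys.length : Int) - 1 then acc ++ [PySem.List.pyGetD ys (i + 1) ' '] else acc
        else acc) []
    = pvG q ys := by
  rw [PySem.List.pyRange_one, List.foldl_map]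
  have h1 : (((ys.length : Int) - 1) - 0).toNat = ys.length - 1 := by omega
  rw [h1]
  have h2 : (List.range (ys.length - 1)).foldl
      (fun acc (k : Nat) =>
        if q (PySem.List.pyGetD ys ((0:Int) + ↑k) ' ') then
          if ((0:Int) + ↑k) ≠ (ys.length : Int) - 1 then acc ++ [PySem.List.pyGetD ys (((0:Int) + ↑k) + 1) ' '] else acc
        else acc) []
      = (List.range (ys.length - 1)).foldl
      (fun acc k => if q (ys.getD k ' ') then acc ++ [ys.getD (k+1) ' '] else acc) [] := by
    apply PySem.List.foldl_congr_mem
    intro acc k hk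
    have hklt : k < ys.length - 1 := List.mem_range.mp hk
    simp only [zero_add, ne_eq, ite_not]
    rw [if_neg (show ¬((k:Int) = (ys.length:Int) - 1) by omega)]
    rw [show ((k:Int) + 1) = ((k + 1 : Nat) : Int) by push_cast; ring]
    simp only [PySem.List.pyGetD_natCast]
  rw [h2, pv_loopPairs q ys]
  simp

-- B's streaming pass on an all-alpha list ys with previous char state
theorem pv_loopB (q : Char → Bool) :
    ∀ (ys : List Char) (p? : Option Char) (acc : List Char),
      (ys.foldl
        (fun (s : Option Char × List Char) c =>
          (some c,
            match s.1 with
            | some p => if q p then s.2 ++ [c] else s.2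
            | none => s.2))
        (p?, acc)).2
      = acc ++ (match p? with | some p => pvH q p ys | none => pvG q ys) := by
  intro ys
  induction ys with
  | nil => intro p? acc; cases p? <;> simp [pvH, pvG]
  | cons c cs ih =>
    intro p? acc
    cases p? with
    | none =>
      rw [List.foldl_cons]
      simp only []
      rw [ih (some c) acc]
      simp [pvG]
    | some p =>
      rw [List.foldl_cons]
      simp only []
      rw [ih (some c) _]
      simp only [pvH]
      by_cases hq : q p <;> simp [hq]

-- ===== VERDICT (by name: the statement is the Claim_ definition above) =====
theorem comes_after_spec : Claim_equal_comes_after := by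
  intro st l _
  unfold Spec_comes_after comes_after comes_after_alt
  simp only [PySem.List.slice_to_neg_one]
  set q : Char → Bool :=
    fun a => ([a] == PySem.Chars.lower l.toList || [a] == PySem.Chars.upper l.toList) with hq
  rw [pv_loopA1 st.toList ' ' PySem.Chars.isalpha]
  rw [pv_loopA2 q (st.toList.dropLast.filter PySem.Chars.isalpha)]
  rw [PySem.List.foldl_if_eq_foldl_filter PySem.Chars.isalpha
    (fun (s : Option Char × List Char) c =>
      (some c,
        match s.1 with
        | some p => if q p then s.2 ++ [c] else s.2
        | none => s.2))]
  rw [pv_loopB q (st.toList.dropLast.filter PySem.Chars.isalpha) none []]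
  simp
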